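-- pv_equiv track=rewrite | github.com/aAbstract/iv-dms-backend | scripts/parse_gacar.py | convert_to_listing
-- ===== SOURCE A (Python) =====
-- def convert_to_listing(text):
--
--     if ("\n(a)" in text) or ("\n(i)" in text) or (("\n(1)" in text)):
--
--         first_level = "i"
--         second_level = "a"
--         a_level = text.find("\n(a)") if text.find("\n(a)")!= -1 else 9999
--         r_level = text.find("\n(i)") if text.find("\n(i)")!= -1 else 99999
--         n_level = text.find("\n(1)") if text.find("\n(1)") != -1 else 99999
--
--         if (a_level < r_level) and (a_level < n_level):
--             first_level = "a"
--             if r_level < n_level: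
--                 second_level = "i"
--             else:
--                 second_level = "1"
--
--         elif (n_level < r_level) and (n_level < a_level):
--             first_level = "1"
--             if r_level < a_level:
--                 second_level = "i"
--             else:
--                 second_level = "a"
--         elif (r_level < n_level) and (r_level < a_level):
--             first_level = "i"
--             if n_level < a_level:
--                 second_level = "1"
--             else:
--                 second_level = "a"
--
--         romans = [
--             "(i)",
--             "(ii)",
--             "(iii)",
--             "(iv)",
--             "(v)",
--             "(vi)",
--             "(vii)",
--             "(viii)",
--         ]
--         numbers = [
--             "(1)",
--             "(2)",
--             "(3)",
--             "(4)",
--             "(5)",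
--             "(6)",
--             "(7)",
--             "(8)"
--         ]
--         alphas = [
--             "(a)",
--             "(b)",
--             "(c)",
--             "(d)",
--             "(e)",
--             "(f)",
--             "(g)",
--             "(h)"
--         ]
--         if(first_level == "a"):
--             for i, g in zip(alphas,romans):
--                 text = text.replace(i, g)
--
--         elif(first_level == "r"):
--             pass
--
--         elif(first_level == "1"):
--             for i, g in zip(numbers,romans):
--                 text = text.replace(i, g)
--
--         if(second_level == "a"):
--             pass
--         elif(second_level == "r"):
--             for i, g in zip(romans,alphas):
--                 text = text.replace(i, g)
--         elif(second_level == "1"):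
--             for i, g in zip(numbers,alphas):
--                 text = text.replace(i, g)
--         return text
--     else:
--         return text
-- ===== SOURCE B (Python) =====
-- import re
--
-- _ROMANS = ["(i)", "(ii)", "(iii)", "(iv)", "(v)", "(vi)", "(vii)", "(viii)"]
-- _NUMBERS = ["(1)", "(2)", "(3)", "(4)", "(5)", "(6)", "(7)", "(8)"]
-- _ALPHAS = ["(a)", "(b)", "(c)", "(d)", "(e)", "(f)", "(g)", "(h)"]
--
-- # matches exactly the 24 listing tokens; no token is a prefix of another, so the
-- # match at any position is unambiguous
-- _TOKEN_RE = re.compile(r"\((?:viii|vii|vi|iv|iii|ii|i|v|[a-h1-8])\)")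
--
--
-- def convert_to_listing(text):
--     if not (("\n(a)" in text) or ("\n(i)" in text) or ("\n(1)" in text)):
--         return text
--
--     first_level = "i"
--     second_level = "a"
--     a_level = text.find("\n(a)") if text.find("\n(a)") != -1 else 9999
--     r_level = text.find("\n(i)") if text.find("\n(i)") != -1 else 99999
--     n_level = text.find("\n(1)") if text.find("\n(1)") != -1 else 99999
--
--     if (a_level < r_level) and (a_level < n_level):
--         first_level = "a"
--         second_level = "i" if r_level < n_level else "1"
--     elif (n_level < r_level) and (n_level < a_level):
--         first_level = "1"
--         second_level = "i" if r_level < a_level else "a"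
--     elif (r_level < n_level) and (r_level < a_level):
--         first_level = "i"
--         second_level = "1" if n_level < a_level else "a"
--
--     mapping = {}
--     if first_level == "a":
--         mapping.update(zip(_ALPHAS, _ROMANS))
--     elif first_level == "1":
--         mapping.update(zip(_NUMBERS, _ROMANS))
--     if second_level == "1":
--         mapping.update(zip(_NUMBERS, _ALPHAS))
--
--     return _TOKEN_RE.sub(lambda m: mapping.get(m.group(0), m.group(0)), text)
-- ===== Notes on version B (the rewrite author's own statement) =====
-- stated objective: idiomatic
-- what changed: A's three loop-blocks of up to 16 chained text.replace passes are replaced by building one dict from source marker to target marker and applying it in a single simultaneous left-to-right substitution pass (re.sub over a token pattern with a dict lookup callback); the level-selection decision tree is kept verbatim.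
import Mathlib
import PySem

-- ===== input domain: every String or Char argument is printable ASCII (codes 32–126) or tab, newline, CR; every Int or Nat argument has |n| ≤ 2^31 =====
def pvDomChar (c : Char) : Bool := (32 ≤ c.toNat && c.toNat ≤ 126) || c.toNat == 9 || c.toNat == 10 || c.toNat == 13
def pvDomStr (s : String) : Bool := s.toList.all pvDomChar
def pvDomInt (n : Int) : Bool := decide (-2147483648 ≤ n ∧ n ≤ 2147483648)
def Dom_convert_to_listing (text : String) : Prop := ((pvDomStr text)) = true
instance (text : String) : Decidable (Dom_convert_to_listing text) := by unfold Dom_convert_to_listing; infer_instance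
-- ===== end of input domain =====

-- B replaces A's three loops of chained text.replace calls by ONE simultaneous
-- substitution: a dict from source marker to target marker, applied in a single
-- left-to-right scan over the text (Python: re.sub with a callback); the
-- level-selection decision tree is kept verbatim (objective: idiomatic).

-- ===== shared helpers (identical code in Source A and Source B: guard, sentinel levels, decision tree, marker lists) =====
def pvMarkGuard (text : String) : Bool :=
  PySem.Str.isIn "\n(a)" text || PySem.Str.isIn "\n(i)" text || PySem.Str.isIn "\n(1)" text

-- the decision tree on the three marker positions (first_level, second_level)
def pvPick (a_level r_level n_level : Int) : String × String :=
  if a_level < r_level ∧ a_level < n_level then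
    ("a", if r_level < n_level then "i" else "1")
  else if n_level < r_level ∧ n_level < a_level then
    ("1", if r_level < a_level then "i" else "a")
  else if r_level < n_level ∧ r_level < a_level then
    ("i", if n_level < a_level then "1" else "a")
  else ("i", "a")    -- defaults first_level = "i", second_level = "a" (no branch fires)

def pvLevels (text : String) : String × String :=
  let a_level : Int := if PySem.Str.find text "\n(a)" ≠ -1 then PySem.Str.find text "\n(a)" else 9999
  let r_level : Int := if PySem.Str.find text "\n(i)" ≠ -1 then PySem.Str.find text "\n(i)" else 99999
  let n_level : Int := if PySem.Str.find text "\n(1)" ≠ -1 then PySem.Str.find text "\n(1)" else 99999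
  pvPick a_level r_level n_level

def pvRomans : List String := ["(i)", "(ii)", "(iii)", "(iv)", "(v)", "(vi)", "(vii)", "(viii)"]
def pvNumbers : List String := ["(1)", "(2)", "(3)", "(4)", "(5)", "(6)", "(7)", "(8)"]
def pvAlphas : List String := ["(a)", "(b)", "(c)", "(d)", "(e)", "(f)", "(g)", "(h)"]

-- ===== PORT A =====
def convert_to_listing (text : String) : String :=
  if pvMarkGuard text then
    let fs := pvLevels text
    let text1 :=
      if fs.1 = "a" then
        List.foldl (fun t (p : String × String) => PySem.Str.replace t p.1 p.2) text (pvAlphas.zip pvRomans)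
      else if fs.1 = "r" then text
      else if fs.1 = "1" then
        List.foldl (fun t (p : String × String) => PySem.Str.replace t p.1 p.2) text (pvNumbers.zip pvRomans)
      else text
    if fs.2 = "a" then text1
    else if fs.2 = "r" then
      List.foldl (fun t (p : String × String) => PySem.Str.replace t p.1 p.2) text1 (pvRomans.zip pvAlphas)
    else if fs.2 = "1" then
      List.foldl (fun t (p : String × String) => PySem.Str.replace t p.1 p.2) text1 (pvNumbers.zip pvAlphas)
    else text1
  else text

-- ===== PORT B =====
-- the 24 tokens _TOKEN_RE matches, in the regex's alternation order
def pvTokens : List (List Char) :=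
  [['(', 'v', 'i', 'i', 'i', ')'],
   ['(', 'v', 'i', 'i', ')'],
   ['(', 'v', 'i', ')'],
   ['(', 'i', 'v', ')'],
   ['(', 'i', 'i', 'i', ')'],
   ['(', 'i', 'i', ')'],
   ['(', 'i', ')'],
   ['(', 'v', ')'],
   ['(', 'a', ')'],
   ['(', 'b', ')'],
   ['(', 'c', ')'],
   ['(', 'd', ')'],
   ['(', 'e', ')'],
   ['(', 'f', ')'],
   ['(', 'g', ')'],
   ['(', 'h', ')'],
   ['(', '1', ')'],
   ['(', '2', ')'],
   ['(', '3', ')'],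
   ['(', '4', ')'],
   ['(', '5', ')'],
   ['(', '6', ')'],
   ['(', '7', ')'],
   ['(', '8', ')']]

def pvMatchTok (cs : List Char) : Option (List Char) :=
  pvTokens.find? (fun t => t.isPrefixOf cs)

-- hand port of `_TOKEN_RE.sub(repl, text)`: the leftmost-match scan of re.sub.
-- Exact because no token is a prefix of another, so at each position at most one
-- token (= one regex match) starts there.
def pvTokSub (f : List Char → List Char) : List Char → List Char
  | [] => []
  | c :: rest =>
    match pvMatchTok (c :: rest) with
    | some t => f t ++ pvTokSub f (List.drop (t.length - 1) rest)
    | none => c :: pvTokSub f rest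
termination_by cs => cs.length
decreasing_by
  · simp only [List.length_drop, List.length_cons]; omega
  · simp

-- the marker lists as char lists (B's mapping lives on the char-list side)
def pvRomansL : List (List Char) :=
  [['(', 'i', ')'], ['(', 'i', 'i', ')'], ['(', 'i', 'i', 'i', ')'], ['(', 'i', 'v', ')'], ['(', 'v', ')'], ['(', 'v', 'i', ')'], ['(', 'v', 'i', 'i', ')'], ['(', 'v', 'i', 'i', 'i', ')']]
def pvNumbersL : List (List Char) :=
  [['(', '1', ')'], ['(', '2', ')'], ['(', '3', ')'], ['(', '4', ')'], ['(', '5', ')'], ['(', '6', ')'], ['(', '7', ')'], ['(', '8', ')']]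
def pvAlphasL : List (List Char) :=
  [['(', 'a', ')'], ['(', 'b', ')'], ['(', 'c', ')'], ['(', 'd', ')'], ['(', 'e', ')'], ['(', 'f', ')'], ['(', 'g', ')'], ['(', 'h', ')']]

def convert_to_listing_alt (text : String) : String :=
  if pvMarkGuard text then
    let fs := pvLevels text
    let m1 : PySem.Dict (List Char) (List Char) :=
      if fs.1 = "a" then
        List.foldl (fun d (p : List Char × List Char) => PySem.Dict.insert d p.1 p.2) ⟨[]⟩ (pvAlphasL.zip pvRomansL)
      else if fs.1 = "1" then
        List.foldl (fun d (p : List Char × List Char) => PySem.Dict.insert d p.1 p.2) ⟨[]⟩ (pvNumbersL.zip pvRomansL)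
      else ⟨[]⟩
    let m2 : PySem.Dict (List Char) (List Char) :=
      if fs.2 = "1" then
        List.foldl (fun d (p : List Char × List Char) => PySem.Dict.insert d p.1 p.2) m1 (pvNumbersL.zip pvAlphasL)
      else m1
    String.ofList (pvTokSub (fun t => PySem.Dict.getD m2 t t) text.toList)
  else text

-- ===== PRECONDITION & SPEC =====
def Spec_convert_to_listing (text : String) (out : String) : Prop := out = convert_to_listing_alt text
instance (text : String) (out : String) : Decidable (Spec_convert_to_listing text out) := by unfold Spec_convert_to_listing; infer_instance

-- ===== CLAIM (what is proved, stated in full; the proofs are below) =====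
def Claim_equal_convert_to_listing : Prop := ∀ (text : String), Dom_convert_to_listing text → Spec_convert_to_listing text (convert_to_listing text)

-- ===== LEMMAS AND PROOFS =====

-- clean recursion computing Chars.replace for a nonempty pattern
def pvRepc (old new : List Char) : List Char → List Char
  | [] => []
  | c :: rest =>
    if old.isPrefixOf (c :: rest) then new ++ pvRepc old new (List.drop (old.length - 1) rest)
    else c :: pvRepc old new rest
termination_by cs => cs.length
decreasing_by
  · simp only [List.length_drop, List.length_cons]; omega
  · simp

-- decided token facts
set_option maxRecDepth 4096 in
lemma pvTok_ne_nil : ∀ t ∈ pvTokens, t ≠ [] := by decide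
set_option maxRecDepth 4096 in
lemma pvTok_head : ∀ t ∈ pvTokens, t.head? = some '(' := by decide
lemma pvTok_tail_noParen : ∀ t ∈ pvTokens, ∀ c ∈ t.tail, c ≠ '(' := by
  have h : pvTokens.all (fun t => t.tail.all (fun c => c != '(')) = true := by decide
  simp only [List.all_eq_true, bne_iff_ne] at h
  exact h
set_option maxRecDepth 4096 in
lemma pvTok_anti : ∀ t₁ ∈ pvTokens, ∀ t₂ ∈ pvTokens, t₁.isPrefixOf t₂ = true → t₁ = t₂ := by decide

lemma pvTok_cons : ∀ t ∈ pvTokens, t = '(' :: t.tail := by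
  intro t ht
  have h := pvTok_head t ht
  cases t with
  | nil => simp at h
  | cons c w => simp_all

lemma pvMatchTok_none_iff (cs : List Char) :
    pvMatchTok cs = none ↔ ∀ t ∈ pvTokens, t.isPrefixOf cs = false := by
  simp only [pvMatchTok, List.find?_eq_none, Bool.not_eq_true]

lemma pvMatchTok_some (cs t : List Char) (h : pvMatchTok cs = some t) :
    t ∈ pvTokens ∧ t.isPrefixOf cs = true := by
  rw [pvMatchTok] at h
  exact ⟨List.mem_of_find?_eq_some h,
    @List.find?_some _ (fun t => t.isPrefixOf cs) t pvTokens h⟩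

lemma pvMatchTok_of_prefix {t cs : List Char} (ht : t ∈ pvTokens) (hp : t.isPrefixOf cs = true) :
    pvMatchTok cs = some t := by
  have hs : (pvTokens.find? (fun t => t.isPrefixOf cs)).isSome := by
    rw [List.find?_isSome]; exact ⟨t, ht, hp⟩
  obtain ⟨u, hu⟩ := Option.isSome_iff_exists.mp hs
  have hu' : pvMatchTok cs = some u := hu
  obtain ⟨humem, hupre⟩ := pvMatchTok_some cs u hu'
  have hcomp := List.prefix_or_prefix_of_prefix (List.isPrefixOf_iff_prefix.mp hupre)
    (List.isPrefixOf_iff_prefix.mp hp)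
  have hut : u = t := by
    rcases hcomp with h | h
    · exact pvTok_anti u humem t ht (List.isPrefixOf_iff_prefix.mpr h)
    · exact (pvTok_anti t ht u humem (List.isPrefixOf_iff_prefix.mpr h)).symm
  rw [hu', hut]

-- decomposing a token match at the head of a list
lemma pvPrefix_decomp {t : List Char} {c : Char} {rest : List Char}
    (htp : t.isPrefixOf (c :: rest) = true) (htne : t ≠ []) :
    ∃ w ys, t = c :: w ∧ rest = w ++ ys ∧ List.drop (t.length - 1) rest = ys := by
  obtain ⟨ys, hys⟩ := List.isPrefixOf_iff_prefix.mp htp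
  cases t with
  | nil => exact absurd rfl htne
  | cons a w =>
    rw [List.cons_append, List.cons.injEq] at hys
    refine ⟨w, ys, by rw [hys.1], hys.2.symm, ?_⟩
    rw [← hys.2]
    simp

lemma pvDropBound (t : List Char) (c : Char) (rest : List Char) (n : Nat)
    (h : (c :: rest).length ≤ n + 1) : (List.drop (t.length - 1) rest).length ≤ n := by
  simp only [List.length_drop, List.length_cons] at h ⊢
  omega

-- defining equations for pvTokSub
lemma pvTokSub_nil (f : List Char → List Char) : pvTokSub f [] = [] := by
  simp only [pvTokSub]

lemma pvTokSub_cons_some (f : List Char → List Char) (c : Char) (rest t : List Char)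
    (h : pvMatchTok (c :: rest) = some t) :
    pvTokSub f (c :: rest) = f t ++ pvTokSub f (List.drop (t.length - 1) rest) := by
  simp only [pvTokSub, h]

lemma pvTokSub_cons_none (f : List Char → List Char) (c : Char) (rest : List Char)
    (h : pvMatchTok (c :: rest) = none) :
    pvTokSub f (c :: rest) = c :: pvTokSub f rest := by
  simp only [pvTokSub, h]

-- a matched token is consumed as a whole
lemma pvTokSub_token (f : List Char → List Char) {t : List Char} (ht : t ∈ pvTokens) (xs : List Char) :
    pvTokSub f (t ++ xs) = f t ++ pvTokSub f xs := by
  obtain ⟨w, hw⟩ : ∃ w, t = '(' :: w := ⟨t.tail, pvTok_cons t ht⟩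
  subst hw
  have hp : ('(' :: w).isPrefixOf (('(' :: w) ++ xs) = true :=
    List.isPrefixOf_iff_prefix.mpr (List.prefix_append _ xs)
  rw [List.cons_append] at hp
  rw [List.cons_append, pvTokSub_cons_some f '(' (w ++ xs) _ (pvMatchTok_of_prefix ht hp)]
  congr 1
  have : List.drop (('(' :: w).length - 1) (w ++ xs) = xs := by simp
  rw [this]

lemma pvTokSub_id : ∀ (n : Nat) (cs : List Char), cs.length ≤ n → pvTokSub (fun t => t) cs = cs := by
  intro n
  induction n with
  | zero =>
    intro cs h
    have hcs : cs = [] := by cases cs <;> simp_all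
    subst hcs; exact pvTokSub_nil _
  | succ n ih =>
    intro cs h
    cases cs with
    | nil => exact pvTokSub_nil _
    | cons c rest =>
      cases hm : pvMatchTok (c :: rest) with
      | none =>
        rw [pvTokSub_cons_none _ _ _ hm, ih rest (by simp at h; omega)]
      | some t =>
        obtain ⟨htm, htp⟩ := pvMatchTok_some _ _ hm
        obtain ⟨w, ys, hcw, hrest, hdrop⟩ := pvPrefix_decomp htp (pvTok_ne_nil t htm)
        rw [pvTokSub_cons_some _ _ _ _ hm, hdrop,
          ih ys (hdrop ▸ pvDropBound t c rest n h)]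
        rw [hcw, hrest]; simp

lemma pvTokSub_congr {f f' : List Char → List Char} (hf : ∀ t ∈ pvTokens, f t = f' t) :
    ∀ (n : Nat) (cs : List Char), cs.length ≤ n → pvTokSub f cs = pvTokSub f' cs := by
  intro n
  induction n with
  | zero =>
    intro cs h
    have hcs : cs = [] := by cases cs <;> simp_all
    subst hcs; rw [pvTokSub_nil, pvTokSub_nil]
  | succ n ih =>
    intro cs h
    cases cs with
    | nil => rw [pvTokSub_nil, pvTokSub_nil]
    | cons c rest =>
      cases hm : pvMatchTok (c :: rest) with
      | none => rw [pvTokSub_cons_none _ _ _ hm, pvTokSub_cons_none _ _ _ hm,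
          ih rest (by simp at h; omega)]
      | some t =>
        obtain ⟨htm, _⟩ := pvMatchTok_some _ _ hm
        rw [pvTokSub_cons_some _ _ _ _ hm, pvTokSub_cons_some _ _ _ _ hm, hf t htm,
          ih _ (pvDropBound t c rest n h)]

-- a '('-free chunk passes through pvRepc unchanged (pattern starts with '(')
lemma pvRepc_noParen_chunk {old new : List Char} (hh : old.head? = some '(')
    (w : List Char) (hw : ∀ d ∈ w, d ≠ '(') (xs : List Char) :
    pvRepc old new (w ++ xs) = w ++ pvRepc old new xs := by
  induction w with
  | nil => simp
  | cons d w' ih =>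
    have hnp : old.isPrefixOf (d :: (w' ++ xs)) = false := by
      cases old with
      | nil => simp at hh
      | cons o ot =>
        have ho : o = '(' := by simpa using hh
        have hd : d ≠ '(' := hw d (by simp)
        simp [List.isPrefixOf, ho]
        intro h
        exact absurd h.symm hd
    rw [List.cons_append, pvRepc.eq_2, hnp]
    simp only [Bool.false_eq_true, if_false]
    rw [ih (fun d hd => hw d (by simp [hd]))]
    simp

-- chains of single replaces as one token map
def pvChainMap (l : List (List Char × List Char)) (t : List Char) : List Char :=
  l.foldl (fun acc p => if acc = p.1 then p.2 else acc) t

-- a single replace with a token pattern is a one-token pvTokSub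
lemma pvRepc_eq_tokSub {pat : List Char} (hpat : pat ∈ pvTokens) (rep : List Char) :
    ∀ (n : Nat) (cs : List Char), cs.length ≤ n →
    pvRepc pat rep cs = pvTokSub (fun t => if t = pat then rep else t) cs := by
  intro n
  induction n with
  | zero =>
    intro cs h
    have hcs : cs = [] := by cases cs <;> simp_all
    subst hcs; rw [pvTokSub_nil, pvRepc.eq_1]
  | succ n ih =>
    intro cs h
    cases cs with
    | nil => rw [pvTokSub_nil, pvRepc.eq_1]
    | cons c rest =>
      cases hm : pvMatchTok (c :: rest) with
      | none =>
        have hnp : pat.isPrefixOf (c :: rest) = false :=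
          (pvMatchTok_none_iff _).mp hm pat hpat
        rw [pvRepc.eq_2, hnp]
        simp only [Bool.false_eq_true, if_false]
        rw [pvTokSub_cons_none _ _ _ hm, ih rest (by simp at h; omega)]
      | some t =>
        obtain ⟨htm, htp⟩ := pvMatchTok_some _ _ hm
        by_cases hteq : t = pat
        · subst hteq
          rw [pvRepc.eq_2, htp]
          simp only [if_true]
          rw [pvTokSub_cons_some _ _ _ _ hm]
          rw [ih _ (pvDropBound t c rest n h)]
          simp
        · -- the matched token is another token: pat does not start here
          have hnp : pat.isPrefixOf (c :: rest) = false := by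
            cases hx : pat.isPrefixOf (c :: rest) with
            | false => rfl
            | true =>
              have := pvMatchTok_of_prefix hpat hx
              rw [hm] at this
              exact absurd (Option.some.inj this) hteq
          rw [pvRepc.eq_2, hnp]
          simp only [Bool.false_eq_true, if_false]
          obtain ⟨w, ys, hcw, hrest, hdrop⟩ := pvPrefix_decomp htp (pvTok_ne_nil t htm)
          rw [pvTokSub_cons_some _ _ _ _ hm]
          simp only [if_neg hteq]
          have hwtail : w = t.tail := by rw [hcw]; rfl
          rw [hdrop, hrest,
            pvRepc_noParen_chunk (pvTok_head pat hpat) w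
              (by rw [hwtail]; exact pvTok_tail_noParen t htm) ys,
            ih ys (hdrop ▸ pvDropBound t c rest n h)]
          rw [hcw]; simp

-- Chars.replace with a nonempty pattern is pvRepc
lemma pvReplace_go_spec (old new : List Char) (hold : old ≠ []) :
    ∀ (fuel : Nat) (l acc : List Char), l.length ≤ fuel →
    PySem.Chars.replace.go old new fuel l acc = acc.reverse ++ pvRepc old new l := by
  intro fuel
  induction fuel with
  | zero =>
    intro l acc h
    have hl : l = [] := by cases l <;> simp_all
    subst hl
    simp [PySem.Chars.replace.go, pvRepc]
  | succ n ih =>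
    intro l acc h
    cases l with
    | nil => simp [PySem.Chars.replace.go, pvRepc]
    | cons c rest =>
      rw [PySem.Chars.replace.go]
      cases hp : old.isPrefixOf (c :: rest) with
      | true =>
        simp only [if_true]
        have holdlen : 1 ≤ old.length := by cases old <;> simp_all
        have hdl : List.drop old.length (c :: rest) = List.drop (old.length - 1) rest := by
          obtain ⟨k, hk⟩ : ∃ k, old.length = k + 1 := ⟨old.length - 1, by omega⟩
          rw [hk]; simp
        rw [hdl, ih _ _ (by simp only [List.length_drop, List.length_cons] at h ⊢; omega)]
        rw [pvRepc.eq_2, hp]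
        simp
      | false =>
        simp only [Bool.false_eq_true, if_false]
        rw [ih rest (c :: acc) (by simp at h; omega)]
        rw [pvRepc.eq_2, hp]
        simp

lemma pvReplace_eq_repc (s old new : List Char) (hold : old ≠ []) :
    PySem.Chars.replace s old new = pvRepc old new s := by
  have hemp : old.isEmpty = false := by cases old <;> simp_all
  rw [PySem.Chars.replace, hemp]
  simpa using pvReplace_go_spec old new hold s.length s [] le_rfl

-- prefix reflection: a '('-free prefix of a substituted list was a prefix already
lemma pvPrefix_reflect {g : List Char → List Char} (hg : ∀ t ∈ pvTokens, g t ∈ pvTokens) :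
    ∀ (n : Nat) (rest : List Char), rest.length ≤ n →
    ∀ (w : List Char), (∀ c ∈ w, c ≠ '(') → w.isPrefixOf (pvTokSub g rest) = true →
    w.isPrefixOf rest = true := by
  intro n
  induction n with
  | zero =>
    intro rest h w hw hp
    have hr : rest = [] := by cases rest <;> simp_all
    subst hr; rw [pvTokSub_nil] at hp; exact hp
  | succ n ih =>
    intro rest h w hw hp
    cases rest with
    | nil => rw [pvTokSub_nil] at hp; exact hp
    | cons c rs =>
      cases hm : pvMatchTok (c :: rs) with
      | some t =>
        obtain ⟨htm, _⟩ := pvMatchTok_some _ _ hm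
        rw [pvTokSub_cons_some _ _ _ _ hm] at hp
        cases w with
        | nil => simp
        | cons e w' =>
          exfalso
          obtain ⟨u, hu⟩ : ∃ u, g t = '(' :: u := ⟨(g t).tail, pvTok_cons (g t) (hg t htm)⟩
          rw [hu, List.cons_append] at hp
          simp only [List.isPrefixOf, Bool.and_eq_true, beq_iff_eq] at hp
          exact hw e (by simp) hp.1
      | none =>
        rw [pvTokSub_cons_none _ _ _ hm] at hp
        cases w with
        | nil => simp
        | cons e w' =>
          simp only [List.isPrefixOf, Bool.and_eq_true, beq_iff_eq] at hp ⊢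
          exact ⟨hp.1, ih rs (by simp at h; omega) w'
            (fun d hd => hw d (by simp [hd])) hp.2⟩

-- composing two token substitutions
lemma pvTokSub_comp {f g : List Char → List Char} (hg : ∀ t ∈ pvTokens, g t ∈ pvTokens) :
    ∀ (n : Nat) (cs : List Char), cs.length ≤ n →
    pvTokSub f (pvTokSub g cs) = pvTokSub (fun t => f (g t)) cs := by
  intro n
  induction n with
  | zero =>
    intro cs h
    have hcs : cs = [] := by cases cs <;> simp_all
    subst hcs; rw [pvTokSub_nil, pvTokSub_nil, pvTokSub_nil]
  | succ n ih =>
    intro cs h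
    cases cs with
    | nil => rw [pvTokSub_nil, pvTokSub_nil, pvTokSub_nil]
    | cons c rest =>
      cases hm : pvMatchTok (c :: rest) with
      | some t =>
        obtain ⟨htm, htp⟩ := pvMatchTok_some _ _ hm
        rw [pvTokSub_cons_some _ _ _ _ hm, pvTokSub_cons_some _ _ _ _ hm,
          pvTokSub_token f (hg t htm),
          ih _ (pvDropBound t c rest n h)]
      | none =>
        rw [pvTokSub_cons_none _ _ _ hm]
        have hm2 : pvMatchTok (c :: pvTokSub g rest) = none := by
          rw [pvMatchTok_none_iff]
          intro v hv
          cases hpre : v.isPrefixOf (c :: pvTokSub g rest) with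
          | false => rfl
          | true =>
            exfalso
            obtain ⟨u, hu⟩ : ∃ u, v = '(' :: u := ⟨v.tail, pvTok_cons v hv⟩
            have hutail : u = v.tail := by rw [hu]; rfl
            rw [hu] at hpre
            simp only [List.isPrefixOf, Bool.and_eq_true, beq_iff_eq] at hpre
            have hwp : u.isPrefixOf rest = true :=
              pvPrefix_reflect hg n rest (by simp at h; omega) u
                (by rw [hutail]; exact pvTok_tail_noParen v hv) hpre.2
            have hvp : v.isPrefixOf (c :: rest) = true := by
              rw [hu]
              simp only [List.isPrefixOf, Bool.and_eq_true, beq_iff_eq]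
              exact ⟨hpre.1, hwp⟩
            have := (pvMatchTok_none_iff _).mp hm v hv
            rw [hvp] at this
            exact Bool.noConfusion this
        rw [pvTokSub_cons_none _ _ _ hm2, pvTokSub_cons_none _ _ _ hm,
          ih rest (by simp at h; omega)]

-- the chained replaces (at the char-list level) are one simultaneous token map
lemma pvChain_eq_tokSub :
    ∀ (l : List (List Char × List Char)), (∀ p ∈ l, p.1 ∈ pvTokens ∧ p.2 ∈ pvTokens) →
    ∀ (cs : List Char),
    List.foldl (fun cs p => PySem.Chars.replace cs p.1 p.2) cs l = pvTokSub (pvChainMap l) cs := by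
  intro l
  induction l with
  | nil =>
    intro _ cs
    simpa [pvChainMap] using (pvTokSub_id cs.length cs le_rfl).symm
  | cons p ps ih =>
    intro hl cs
    obtain ⟨hp1, hp2⟩ := hl p (by simp)
    have hstep : PySem.Chars.replace cs p.1 p.2
        = pvTokSub (fun t => if t = p.1 then p.2 else t) cs := by
      rw [pvReplace_eq_repc cs p.1 p.2 (pvTok_ne_nil p.1 hp1)]
      exact pvRepc_eq_tokSub hp1 p.2 cs.length cs le_rfl
    calc List.foldl (fun cs p => PySem.Chars.replace cs p.1 p.2) cs (p :: ps)
        = List.foldl (fun cs p => PySem.Chars.replace cs p.1 p.2)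
            (PySem.Chars.replace cs p.1 p.2) ps := by simp
      _ = pvTokSub (pvChainMap ps) (PySem.Chars.replace cs p.1 p.2) :=
            ih (fun q hq => hl q (by simp [hq])) _
      _ = pvTokSub (pvChainMap ps) (pvTokSub (fun t => if t = p.1 then p.2 else t) cs) := by
            rw [hstep]
      _ = pvTokSub (fun t => pvChainMap ps (if t = p.1 then p.2 else t)) cs := by
            refine pvTokSub_comp ?_ cs.length cs le_rfl
            intro t ht
            by_cases h : t = p.1 <;> simp [h, hp2, ht]
      _ = pvTokSub (pvChainMap (p :: ps)) cs :=
            pvTokSub_congr (fun t _ => rfl) cs.length cs le_rfl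

-- the String-level replace chain, moved to char lists
lemma pvFoldl_replace_toList (ps : List (String × String)) :
    ∀ (s : String),
    (List.foldl (fun t (p : String × String) => PySem.Str.replace t p.1 p.2) s ps).toList
      = List.foldl (fun cs p => PySem.Chars.replace cs p.1 p.2) s.toList
          (ps.map (fun p => (p.1.toList, p.2.toList))) := by
  induction ps with
  | nil => intro s; simp
  | cons p ps ih =>
    intro s
    simp only [List.foldl_cons, List.map_cons]
    rw [ih (PySem.Str.replace s p.1 p.2), PySem.Str.toList_replace]

-- a replace chain whose patterns and replacements are tokens equals one pvTokSub pass
lemma pvChainS_eq (ps : List (String × String)) (psL : List (List Char × List Char))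
    (bm : List Char → List Char)
    (hps : ps.map (fun p => (p.1.toList, p.2.toList)) = psL)
    (hp : ∀ p ∈ psL, p.1 ∈ pvTokens ∧ p.2 ∈ pvTokens)
    (hbm : ∀ t ∈ pvTokens, pvChainMap psL t = bm t)
    (s : String) :
    List.foldl (fun t (p : String × String) => PySem.Str.replace t p.1 p.2) s ps
      = String.ofList (pvTokSub bm s.toList) := by
  have h1 := pvFoldl_replace_toList ps s
  rw [hps] at h1
  have h2 := pvChain_eq_tokSub _ hp s.toList
  have h3 := pvTokSub_congr hbm s.toList.length s.toList le_rfl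
  calc List.foldl (fun t (p : String × String) => PySem.Str.replace t p.1 p.2) s ps
      = String.ofList (List.foldl (fun t (p : String × String) => PySem.Str.replace t p.1 p.2) s ps).toList := by
        rw [String.ofList_toList]
    _ = String.ofList (pvTokSub bm s.toList) := by rw [h1, h2, h3]

-- identity token map: B's pass with an empty dict changes nothing
lemma pvTokSub_empty (s : String) :
    String.ofList (pvTokSub
      (fun t => PySem.Dict.getD (⟨[]⟩ : PySem.Dict (List Char) (List Char)) t t)
      s.toList) = s := by
  have hc : ∀ t ∈ pvTokens,
      PySem.Dict.getD (⟨[]⟩ : PySem.Dict (List Char) (List Char)) t t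
        = (fun (t : List Char) => t) t := by
    intro t _
    simp [PySem.Dict.getD, PySem.Dict.get?]
  rw [pvTokSub_congr hc s.toList.length s.toList le_rfl,
    pvTokSub_id s.toList.length s.toList le_rfl, String.ofList_toList]

lemma pvLevels_cases (text : String) :
    pvLevels text = ("a", "i") ∨ pvLevels text = ("a", "1") ∨
    pvLevels text = ("1", "i") ∨ pvLevels text = ("1", "a") ∨
    pvLevels text = ("i", "1") ∨ pvLevels text = ("i", "a") := by
  show pvPick _ _ _ = _ ∨ pvPick _ _ _ = _ ∨ pvPick _ _ _ = _ ∨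
    pvPick _ _ _ = _ ∨ pvPick _ _ _ = _ ∨ pvPick _ _ _ = _
  generalize (if PySem.Str.find text "\n(a)" ≠ -1 then PySem.Str.find text "\n(a)" else 9999) = a
  generalize (if PySem.Str.find text "\n(i)" ≠ -1 then PySem.Str.find text "\n(i)" else 99999) = r
  generalize (if PySem.Str.find text "\n(1)" ≠ -1 then PySem.Str.find text "\n(1)" else 99999) = n
  unfold pvPick
  split_ifs <;> simp

-- ===== VERDICT (by name: the statement is the Claim_ definition above) =====
set_option maxRecDepth 4096 in
theorem convert_to_listing_spec : Claim_equal_convert_to_listing := by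
  intro text _
  unfold Spec_convert_to_listing convert_to_listing convert_to_listing_alt
  by_cases hg : pvMarkGuard text = true
  · rcases pvLevels_cases text with h | h | h | h | h | h <;>
      simp only [hg, if_true, h, String.reduceEq, reduceIte]
    · refine pvChainS_eq _ (pvAlphasL.zip pvRomansL) _ ?_ ?_ ?_ text <;> decide
    · -- first alphas → romans, then numbers → alphas: one combined chain
      rw [← List.foldl_append]
      refine pvChainS_eq ((pvAlphas.zip pvRomans) ++ (pvNumbers.zip pvAlphas))
        ((pvAlphasL.zip pvRomansL) ++ (pvNumbersL.zip pvAlphasL)) _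
        ?_ ?_ ?_ text <;> decide
    · refine pvChainS_eq _ (pvNumbersL.zip pvRomansL) _ ?_ ?_ ?_ text <;> decide
    · refine pvChainS_eq _ (pvNumbersL.zip pvRomansL) _ ?_ ?_ ?_ text <;> decide
    · refine pvChainS_eq _ (pvNumbersL.zip pvAlphasL) _ ?_ ?_ ?_ text <;> decide
    · exact (pvTokSub_empty text).symm
  · simp [hg]
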